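-- pv_equiv track=rewrite | github.com/AdamZhouSE/pythonHomework | Code/CodeRecords/2849/60601/257410.py | solve
-- ===== SOURCE A (Python) =====
-- def solve(nums:list):
--     re = -1
--     for i in nums:
--         isOK = True
--         for j in nums:
--             if j%i!=0:
--                 isOK = False
--                 break
--         if isOK:
--             re = i
--             break
--     return re
--     pass
-- ===== SOURCE B (Python) =====
-- def solve(nums: list):
--     # 0 can never divide anything, so the only possible universal divisor is
--     # the nonzero element of minimal absolute value; verify it in one pass.
--     nonzero = [x for x in nums if x != 0]
--     if not nonzero:
--         return -1
--     c = min(nonzero, key=abs)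
--     return c if all(x % c == 0 for x in nums) else -1
-- ===== Notes on version B (the rewrite author's own statement) =====
-- stated objective: alternative
-- what changed: Replaces the quadratic all-pairs divisibility scan by picking the single candidate min of the nonzero elements by absolute value and verifying it in one pass (on lists with a 0 where A raises ZeroDivisionError, excluded by Pre_, B simply returns that verified candidate or -1).
import Mathlib
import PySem

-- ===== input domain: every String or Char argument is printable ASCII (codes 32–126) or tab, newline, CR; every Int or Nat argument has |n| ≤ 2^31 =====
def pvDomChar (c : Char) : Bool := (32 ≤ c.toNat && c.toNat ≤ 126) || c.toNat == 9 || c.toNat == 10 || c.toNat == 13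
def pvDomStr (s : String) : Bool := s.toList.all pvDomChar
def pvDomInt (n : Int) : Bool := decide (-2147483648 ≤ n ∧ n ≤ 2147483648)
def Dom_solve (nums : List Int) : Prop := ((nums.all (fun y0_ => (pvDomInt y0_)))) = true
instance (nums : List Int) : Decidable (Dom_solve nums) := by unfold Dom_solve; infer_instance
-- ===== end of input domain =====

-- B replaces A's all-pairs divisibility scan by the single nonzero min-abs candidate, verified in one pass (alternative algorithm).

-- ===== PORT A =====
-- inner 'for j in nums' loop with its break
def solveInner (i : Int) : List Int → Bool
  | [] => true
  | j :: rest => if PySem.Int.mod j i ≠ 0 then false else solveInner i rest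

-- outer 'for i in nums' loop with its break; 're' stays -1 if no i passes
def solveLoop (all : List Int) : List Int → Int
  | [] => -1
  | i :: rest => if solveInner i all then i else solveLoop all rest

def solve (nums : List Int) : Int := solveLoop nums nums

-- ===== PORT B =====
def solve_alt (nums : List Int) : Int :=
  match PySem.List.min? (nums.filter (fun x => decide (x ≠ 0))) (fun x => x.natAbs) with
  | none => -1  -- 'if not nonzero: return -1'
  | some c => if nums.all (fun x => PySem.Int.mod x c == 0) then c else -1

-- ===== PRECONDITION & SPEC =====
-- Pre_ excludes exactly the inputs on which A raises ZeroDivisionError: lists containing 0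
-- with no universal divisor among the elements before the first 0 (there A's loop reaches
-- i = 0 and computes j % 0).
def Pre_solve (nums : List Int) : Prop :=
  (0 : Int) ∈ nums → ∃ i ∈ nums.takeWhile (fun x => decide (x ≠ 0)), ∀ j ∈ nums, i ∣ j
instance (nums : List Int) : Decidable (Pre_solve nums) := by unfold Pre_solve; infer_instance
def pvWitness_solve : List Int := [6, -2, 4]

def Spec_solve (nums : List Int) (out : Int) : Prop := out = solve_alt nums
instance (nums : List Int) (out : Int) : Decidable (Spec_solve nums out) := by unfold Spec_solve; infer_instance

-- ===== CLAIM (what is proved, stated in full; the proofs are below) =====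
def Claim_equal_solve : Prop := ∀ (nums : List Int), Dom_solve nums → Pre_solve nums → Spec_solve nums (solve nums)

-- ===== LEMMAS AND PROOFS =====

theorem solveInner_true_iff (i : Int) (l : List Int) :
    solveInner i l = true ↔ ∀ j ∈ l, i ∣ j := by
  induction l with
  | nil => simp [solveInner]
  | cons j rest ih =>
    have hm : (PySem.Int.mod j i = 0) ↔ i ∣ j := PySem.Int.mod_eq_zero_iff_dvd j i
    by_cases h : i ∣ j
    · simp [solveInner, hm.mpr h, ih, h]
    · have hz : PySem.Int.mod j i ≠ 0 := fun hz0 => h (hm.mp hz0)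
      simp [solveInner, hz, h]

theorem solveLoop_eq_find (all l : List Int) :
    solveLoop all l = (l.find? (fun i => solveInner i all)).getD (-1) := by
  induction l with
  | nil => rfl
  | cons i rest ih =>
    by_cases h : solveInner i all = true
    · simp [solveLoop, List.find?, h]
    · simp only [Bool.not_eq_true] at h
      simp [solveLoop, List.find?, h, ih]

-- the step function of PySem.List.min? with key natAbs
def minStep (acc : Option Int) (x : Int) : Option Int :=
  match acc with
  | none => some x
  | some m => if x.natAbs < m.natAbs then some x else some m

-- joint facts about folding minStep from a 'some' vs 'none' accumulator
theorem minStep_fold_facts (t : List Int) :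
    (∀ m c, t.foldl minStep (some m) = some c →
      c = m ∨ (t.foldl minStep none = some c ∧ c.natAbs < m.natAbs)) ∧
    (∀ y c, t.foldl minStep none = some c → c.natAbs < y.natAbs →
      t.foldl minStep (some y) = some c) := by
  induction t with
  | nil =>
    refine ⟨?_, ?_⟩
    · intro m c h; left; simpa using h.symm
    · intro y c h; simp at h
  | cons z t' ih =>
    obtain ⟨ihA, ihB⟩ := ih
    constructor
    · intro m c h
      simp only [List.foldl_cons] at h ⊢
      by_cases hz : z.natAbs < m.natAbs
      · simp only [minStep, hz, if_pos] at h
        rcases ihA z c h with rfl | ⟨hn, hlt⟩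
        · right; exact ⟨h, hz⟩
        · right; exact ⟨by simpa [minStep] using ihB z c hn hlt, lt_trans hlt hz⟩
      · simp only [minStep, hz, if_neg, not_false_iff] at h
        rcases ihA m c h with rfl | ⟨hn, hlt⟩
        · left; rfl
        · right
          refine ⟨?_, hlt⟩
          simp only [minStep]
          exact ihB z c hn (lt_of_lt_of_le hlt (le_of_not_gt hz))
    · intro y c h hlt
      simp only [List.foldl_cons, minStep] at h ⊢
      by_cases hz : z.natAbs < y.natAbs
      · simpa [hz] using h
      · rw [if_neg hz]
        rcases ihA z c h with rfl | ⟨hn, hc⟩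
        · exact absurd hlt (fun hl => hz (by omega))
        · exact ihB y c hn hlt

theorem min?_eq_foldl (l : List Int) :
    PySem.List.min? l (fun x => x.natAbs) = l.foldl minStep none := by
  unfold PySem.List.min?
  congr 1
  funext acc x
  cases acc <;> rfl

-- firstness: min(xs, key=abs) is the FIRST element of minimal absolute value
theorem min?_first (l : List Int) (c : Int)
    (h : PySem.List.min? l (fun x => x.natAbs) = some c) :
    l.find? (fun i => decide (i.natAbs = c.natAbs)) = some c := by
  rw [min?_eq_foldl] at h
  induction l with
  | nil => simp at h
  | cons x t ih =>
    simp only [List.foldl_cons] at h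
    simp only [minStep] at h
    rcases (minStep_fold_facts t).1 x c h with rfl | ⟨hn, hlt⟩
    · simp [List.find?]
    · have hne : decide (x.natAbs = c.natAbs) = false := decide_eq_false (by omega)
      simp only [List.find?, hne]
      exact ih hn

theorem find?_congr_mem {α : Type} (p q : α → Bool) (l : List α)
    (h : ∀ x ∈ l, p x = q x) : l.find? p = l.find? q := by
  induction l with
  | nil => rfl
  | cons x t ih =>
    have hx := h x (by simp)
    simp only [List.find?, hx]
    cases q x
    · exact ih (fun y hy => h y (by simp [hy]))
    · rfl

-- filtering out only elements the predicate rejects does not change find?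
theorem find?_filter_eq {α : Type} (q r : α → Bool) (l : List α)
    (h : ∀ x ∈ l, q x = true → r x = true) : (l.filter r).find? q = l.find? q := by
  induction l with
  | nil => rfl
  | cons x t ih =>
    have ih' := ih (fun y hy => h y (List.mem_cons_of_mem _ hy))
    by_cases hr : r x = true
    · rw [List.filter_cons_of_pos hr]
      cases hqx : q x <;> simp [List.find?, hqx, ih']
    · have hq : q x = false := by
        cases hqx : q x
        · rfl
        · exact absurd (h x (by simp) hqx) hr
      rw [List.filter_cons_of_neg (by simpa using hr)]
      simp [List.find?, hq, ih']

-- ===== VERDICT (by name: the statements are the Claim_ definitions above) =====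
theorem solve_spec : Claim_equal_solve := by
  intro nums _hdom hpre
  unfold Pre_solve at hpre
  unfold Spec_solve
  cases hm : PySem.List.min? (nums.filter (fun x => decide (x ≠ 0))) (fun x => x.natAbs) with
  | none =>
    have hB : solve_alt nums = -1 := by unfold solve_alt; rw [hm]
    have hnil : nums.filter (fun x => decide (x ≠ 0)) = [] :=
      (PySem.List.min?_eq_none_iff _ _).mp hm
    have hzero : ∀ x ∈ nums, x = 0 := by
      intro x hx
      by_contra hne
      have hmem : x ∈ nums.filter (fun x => decide (x ≠ 0)) :=
        List.mem_filter.mpr ⟨hx, by simpa using hne⟩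
      rw [hnil] at hmem
      simp at hmem
    rw [hB]
    cases nums with
    | nil => rfl
    | cons y t =>
      exfalso
      have hy : y = 0 := hzero y (by simp)
      have h0 : (0 : Int) ∈ y :: t := by rw [← hy]; simp
      obtain ⟨i, hi, _⟩ := hpre h0
      rw [List.takeWhile_cons] at hi
      simp [hy] at hi
  | some c =>
    have hcnz : c ∈ nums.filter (fun x => decide (x ≠ 0)) := PySem.List.min?_mem hm
    have hcmem : c ∈ nums := (List.mem_filter.mp hcnz).1
    have hcne : c ≠ 0 := by
      have := (List.mem_filter.mp hcnz).2
      simpa using this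
    have hmin : ∀ y ∈ nums, y ≠ 0 → c.natAbs ≤ y.natAbs := by
      intro y hy hyne
      exact PySem.List.min?_isMin hm y (List.mem_filter.mpr ⟨hy, by simpa using hyne⟩)
    have habs : ∀ i ∈ nums, (∀ j ∈ nums, i ∣ j) → i.natAbs = c.natAbs := by
      intro i hi hu
      have hdc : i ∣ c := hu c hcmem
      have hine : i ≠ 0 := by rintro rfl; exact hcne (zero_dvd_iff.mp hdc)
      have h1 : i.natAbs ≤ c.natAbs :=
        Nat.le_of_dvd (Int.natAbs_pos.mpr hcne) (Int.natAbs_dvd_natAbs.mpr hdc)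
      have h2 := hmin i hi hine
      omega
    by_cases hval : ∀ j ∈ nums, c ∣ j
    · have hall : nums.all (fun x => PySem.Int.mod x c == 0) = true := by
        simp only [List.all_eq_true, beq_iff_eq]
        intro x hx
        exact (PySem.Int.mod_eq_zero_iff_dvd x c).mpr (hval x hx)
      have hB : solve_alt nums = c := by
        unfold solve_alt
        simp only [hm, hall, if_true]
      rw [hB]
      have hq : nums.find? (fun i => decide (i.natAbs = c.natAbs)) = some c := by
        rw [← find?_filter_eq (fun i => decide (i.natAbs = c.natAbs)) (fun x => decide (x ≠ 0))
              nums ?_]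
        · exact min?_first _ c hm
        · intro x _ hx
          simp only [decide_eq_true_eq] at hx ⊢
          have : 0 < c.natAbs := Int.natAbs_pos.mpr hcne
          intro h0; rw [h0] at hx; simp at hx; omega
      have hpq : ∀ i ∈ nums, (fun i => solveInner i nums) i
          = (fun i => decide (i.natAbs = c.natAbs)) i := by
        intro i hi
        show solveInner i nums = decide (i.natAbs = c.natAbs)
        by_cases hd : ∀ j ∈ nums, i ∣ j
        · simp [(solveInner_true_iff i nums).mpr hd, habs i hi hd]
        · have h1 : solveInner i nums = false := by
            rw [← Bool.not_eq_true, solveInner_true_iff]; exact hd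
          rw [h1]; symm
          simp only [decide_eq_false_iff_not]
          intro heq
          rcases Int.natAbs_eq_natAbs_iff.mp heq with rfl | rfl
          · exact hd hval
          · exact hd (fun j hj => (neg_dvd).mpr (hval j hj))
      unfold solve
      rw [solveLoop_eq_find, find?_congr_mem _ _ _ hpq, hq]
      rfl
    · have hall : nums.all (fun x => PySem.Int.mod x c == 0) = false := by
        rw [not_forall] at hval
        simp only [not_forall, exists_prop] at hval
        obtain ⟨j, hj, hnd⟩ := hval
        simp only [List.all_eq_false]
        exact ⟨j, hj, by
          simp only [beq_iff_eq]
          exact fun h => hnd ((PySem.Int.mod_eq_zero_iff_dvd j c).mp h)⟩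
      have hB : solve_alt nums = -1 := by
        unfold solve_alt
        simp only [hm, hall]
        rfl
      rw [hB]
      have hno : ∀ i ∈ nums, ¬ ∀ j ∈ nums, i ∣ j := by
        intro i hi hu
        have heq := habs i hi hu
        rcases Int.natAbs_eq_natAbs_iff.mp heq with rfl | rfl
        · exact hval hu
        · exact hval (fun j hj => (neg_dvd).mp (hu j hj))
      have hnone : nums.find? (fun i => solveInner i nums) = none := by
        rw [List.find?_eq_none]
        intro i hi
        rw [solveInner_true_iff]
        exact hno i hi
      unfold solve
      rw [solveLoop_eq_find, hnone]
      rfl
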